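-- pv_equiv track=rewrite | github.com/abc20210708/python_study | dfs_bfs/ex/Q18.py | balanced_index
-- ===== SOURCE A (Python) =====
-- def balanced_index(p):
--     cnt = 0 # 왼쪽 괄호의 개수
--     for i in range(len(p)):
--         if p[i] == '(':
--             cnt += 1
--         else :
--             cnt -= 1
--         if cnt == 0:
--             return i
-- ===== SOURCE B (Python) =====
-- def balanced_index(p):
--     # Divide and conquer: the answer in a segment [lo, hi) given the balance `inc`
--     # carried in from the left is either in the left half, or in the right half with
--     # the left half's net balance (recounted via str.count) added to `inc`.
--     def bal(lo, hi):
--         return 2 * p.count('(', lo, hi) - (hi - lo)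
--
--     def first_zero(lo, hi, inc):
--         if hi <= lo:
--             return None
--         if hi - lo == 1:
--             return lo if inc + bal(lo, hi) == 0 else None
--         mid = (lo + hi) // 2
--         r = first_zero(lo, mid, inc)
--         if r is not None:
--             return r
--         return first_zero(mid, hi, inc + bal(lo, mid))
--
--     return first_zero(0, len(p), 0)
-- ===== Notes on version B (the rewrite author's own statement) =====
-- stated objective: alternative
-- what changed: Replaces A's single left-to-right pass with an incrementally updated balance counter by a divide-and-conquer search: recurse into the left half first, and only if it holds no answer recurse into the right half after recounting the left half's net balance with str.count.
import Mathlib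
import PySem

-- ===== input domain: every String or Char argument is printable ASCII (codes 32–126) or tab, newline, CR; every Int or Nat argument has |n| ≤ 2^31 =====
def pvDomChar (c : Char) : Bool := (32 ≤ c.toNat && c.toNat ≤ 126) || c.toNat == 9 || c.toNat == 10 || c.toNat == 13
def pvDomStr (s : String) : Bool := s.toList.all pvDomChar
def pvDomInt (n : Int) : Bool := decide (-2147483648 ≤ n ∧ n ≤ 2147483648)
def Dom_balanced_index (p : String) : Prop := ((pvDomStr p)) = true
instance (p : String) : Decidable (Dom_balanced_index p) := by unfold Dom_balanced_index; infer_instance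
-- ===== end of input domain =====

-- B replaces A's single pass with a running counter by divide and conquer: search the left
-- half first, then the right half with the left half's recounted net balance carried in.
-- Objective: alternative (not faster).

-- ===== PORT A =====
-- A's for-loop over range(len(p)) with counter cnt and early return, as structural recursion.
def balancedIndexLoop : List Char → Int → Nat → Option Int
  | [], _, _ => none
  | c :: cs, cnt, i =>
    let cnt' := if c = '(' then cnt + 1 else cnt - 1
    if cnt' = 0 then some (i : Int) else balancedIndexLoop cs cnt' (i + 1)

def balanced_index (p : String) : Option Int :=
  balancedIndexLoop p.toList 0 0

-- ===== PORT B =====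
-- bal(lo, hi) = 2 * p.count('(', lo, hi) - (hi - lo); p.count over an index range is ported
-- by hand as the count of '(' in the segment (exact: 0 ≤ lo ≤ hi ≤ len(p) at every call).
def segBal (full : List Char) (lo hi : Nat) : Int :=
  2 * (((full.drop lo).take (hi - lo)).count '(' : Int) - ((hi : Int) - (lo : Int))

-- first_zero(lo, hi, inc): the inner divide-and-conquer recursion of Source B, step for step
-- (lo, hi are the nonnegative ints of Source B, so (lo + hi) // 2 is Nat division; the fuel
-- argument only bounds the recursion depth — it starts at len(p) ≥ hi - lo and every
-- recursive call shrinks hi - lo, so the 0-fuel branch is never the computed answer).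
def firstZeroDnc (full : List Char) : Nat → Nat → Nat → Int → Option Int
  | 0, _, _, _ => none
  | fuel + 1, lo, hi, inc =>
    if hi ≤ lo then none
    else if hi - lo = 1 then
      (if inc + segBal full lo hi = 0 then some (lo : Int) else none)
    else
      match firstZeroDnc full fuel lo ((lo + hi) / 2) inc with
      | some r => some r
      | none => firstZeroDnc full fuel ((lo + hi) / 2) hi (inc + segBal full lo ((lo + hi) / 2))

def balanced_index_alt (p : String) : Option Int :=
  firstZeroDnc p.toList p.toList.length 0 p.toList.length 0

-- ===== PRECONDITION & SPEC =====
def Spec_balanced_index (p : String) (out : Option Int) : Prop := out = balanced_index_alt p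
instance (p : String) (out : Option Int) : Decidable (Spec_balanced_index p out) := by unfold Spec_balanced_index; infer_instance

-- ===== CLAIM (what is proved, stated in full; the proofs are below) =====
def Claim_equal_balanced_index : Prop := ∀ (p : String), Dom_balanced_index p → Spec_balanced_index p (balanced_index p)

-- ===== LEMMAS AND PROOFS =====

-- A's loop splits over an append: run the left part; if it does not return, the right part
-- continues from the left part's net balance and shifted index.
theorem balancedIndexLoop_append (l1 l2 : List Char) (cnt : Int) (i : Nat) :
    balancedIndexLoop (l1 ++ l2) cnt i =
      match balancedIndexLoop l1 cnt i with
      | some r => some r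
      | none => balancedIndexLoop l2 (cnt + (2 * (l1.count '(' : Int) - l1.length)) (i + l1.length) := by
  induction l1 generalizing cnt i with
  | nil => simp [balancedIndexLoop]
  | cons c cs ih =>
    simp only [List.cons_append, balancedIndexLoop]
    by_cases hz : (if c = '(' then cnt + 1 else cnt - 1) = 0
    · simp [hz]
    · simp only [if_neg hz, ih]
      have he1 : (if c = '(' then cnt + 1 else cnt - 1) + (2 * (cs.count '(' : Int) - cs.length)
          = cnt + (2 * (((c :: cs).count '(' : Int)) - (c :: cs).length) := by
        split_ifs with h <;> simp [h] <;> ring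
      have he2 : i + 1 + cs.length = i + (c :: cs).length := by simp; omega
      rw [he1, he2]

-- With enough fuel, the divide-and-conquer search over [lo, hi) computes exactly A's loop
-- run on that segment.
theorem firstZeroDnc_eq_loop (full : List Char) (fuel lo hi : Nat) (inc : Int)
    (hfuel : hi - lo ≤ fuel) (hhi : hi ≤ full.length) :
    firstZeroDnc full fuel lo hi inc =
      balancedIndexLoop ((full.drop lo).take (hi - lo)) inc lo := by
  induction fuel generalizing lo hi inc with
  | zero =>
    simp [firstZeroDnc, show hi - lo = 0 by omega, balancedIndexLoop]
  | succ fuel ih =>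
    by_cases h1 : hi ≤ lo
    · simp [firstZeroDnc, h1, show hi - lo = 0 by omega, balancedIndexLoop]
    · by_cases h2 : hi - lo = 1
      · rw [firstZeroDnc]
        simp only [if_neg h1, h2]
        have hlo : lo < full.length := by omega
        have hseg : (full.drop lo).take 1 = [full[lo]] := by
          rw [List.drop_eq_getElem_cons hlo]; rfl
        rw [hseg]
        have hbal : segBal full lo hi = (if full[lo] = '(' then 1 else -1) := by
          unfold segBal
          rw [h2, hseg]
          by_cases hc : full[lo] = '(' <;> simp [hc] <;> omega
        rw [hbal]
        simp only [balancedIndexLoop]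
        by_cases hc : full[lo] = '(' <;> simp [hc, sub_eq_add_neg]
      · rw [firstZeroDnc]
        simp only [if_neg h1, if_neg h2]
        have hm1 : lo < (lo + hi) / 2 := by omega
        have hm2 : (lo + hi) / 2 < hi := by omega
        have hsplit : (full.drop lo).take (hi - lo)
            = (full.drop lo).take ((lo + hi) / 2 - lo) ++ (full.drop ((lo + hi) / 2)).take (hi - (lo + hi) / 2) := by
          have h3 : hi - lo = ((lo + hi) / 2 - lo) + (hi - (lo + hi) / 2) := by omega
          have h4 : full.drop ((lo + hi) / 2) = (full.drop lo).drop ((lo + hi) / 2 - lo) := by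
            rw [List.drop_drop]; congr 1; omega
          rw [h3, List.take_add, h4]
        have hlen : ((full.drop lo).take ((lo + hi) / 2 - lo)).length = (lo + hi) / 2 - lo := by
          simp; omega
        have hcnt : inc + (2 * ((((full.drop lo).take ((lo + hi) / 2 - lo)).count '(') : Int)
              - ((((lo + hi) / 2 - lo : Nat)) : Int))
            = inc + segBal full lo ((lo + hi) / 2) := by
          unfold segBal; push_cast; omega
        rw [hsplit, balancedIndexLoop_append,
            ← ih lo ((lo + hi) / 2) inc (by omega) (by omega), hlen,
            show lo + ((lo + hi) / 2 - lo) = (lo + hi) / 2 by omega, hcnt,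
            ← ih ((lo + hi) / 2) hi (inc + segBal full lo ((lo + hi) / 2)) (by omega) hhi]

-- ===== VERDICT (by name: the statement is the Claim_ definition above) =====
theorem balanced_index_spec : Claim_equal_balanced_index := by
  intro p _
  unfold Spec_balanced_index balanced_index balanced_index_alt
  have h := (firstZeroDnc_eq_loop p.toList p.toList.length 0 p.toList.length 0 (by omega) le_rfl).symm
  have ht : List.take (p.toList.length - 0) (List.drop 0 p.toList) = p.toList := by
    simp
  rw [ht] at h
  exact h
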